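-- pv_equiv track=rewrite | github.com/impactless/Advent_of_Code_2024 | Day_7/day_7.py | possible_calibration
-- ===== SOURCE A (Python) =====
-- def possible_calibration(target, nums, index=1, current_value=0, can_concatenate=False):
--     if index == len(nums):
--         return current_value == target
--
--     if possible_calibration(target, nums, index + 1, current_value + nums[index], can_concatenate):
--         return True
--
--     if possible_calibration(target, nums, index + 1, current_value * nums[index], can_concatenate):
--         return True
--
--     if can_concatenate:
--         concat_value = int(f"{current_value}{nums[index]}")
--         if possible_calibration(target, nums, index + 1, concat_value, can_concatenate):
--             return True
--
--     return False
-- ===== SOURCE B (Python) =====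
-- def possible_calibration(target, nums, index=1, current_value=0, can_concatenate=False):
--     # iterative DFS with an explicit stack; concat frames are kept pending so the
--     # int(f"...") conversion happens exactly when A's lazy recursion would do it
--     stack = [(index, current_value)]
--     while stack:
--         frame = stack.pop()
--         if len(frame) == 3:
--             i, v, n = frame
--             frame = (i, int(f"{v}{n}"))
--         i, cur = frame
--         if i == len(nums):
--             if cur == target:
--                 return True
--             continue
--         n = nums[i]
--         if can_concatenate:
--             stack.append((i + 1, cur, n))
--         stack.append((i + 1, cur * n))
--         stack.append((i + 1, cur + n))
--     return False
-- ===== Notes on version B (the rewrite author's own statement) =====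
-- stated objective: alternative
-- what changed: Replaces A's depth-first ternary recursion by an iterative DFS over an explicit stack of frames (concat conversions kept as pending frames so they happen exactly where A's lazy recursion performs them); same traversal, different decomposition.
-- outside the precondition, e.g. on possible_calibration(0, [0, -1], 1, 0, True): A returns True, B returns True; on possible_calibration(99, [1, -1], 1, 0, True): A raises ValueError, B raises ValueError; on possible_calibration(5, [1, 2], 4, 0, False): A raises IndexError, B raises IndexError
import Mathlib
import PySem

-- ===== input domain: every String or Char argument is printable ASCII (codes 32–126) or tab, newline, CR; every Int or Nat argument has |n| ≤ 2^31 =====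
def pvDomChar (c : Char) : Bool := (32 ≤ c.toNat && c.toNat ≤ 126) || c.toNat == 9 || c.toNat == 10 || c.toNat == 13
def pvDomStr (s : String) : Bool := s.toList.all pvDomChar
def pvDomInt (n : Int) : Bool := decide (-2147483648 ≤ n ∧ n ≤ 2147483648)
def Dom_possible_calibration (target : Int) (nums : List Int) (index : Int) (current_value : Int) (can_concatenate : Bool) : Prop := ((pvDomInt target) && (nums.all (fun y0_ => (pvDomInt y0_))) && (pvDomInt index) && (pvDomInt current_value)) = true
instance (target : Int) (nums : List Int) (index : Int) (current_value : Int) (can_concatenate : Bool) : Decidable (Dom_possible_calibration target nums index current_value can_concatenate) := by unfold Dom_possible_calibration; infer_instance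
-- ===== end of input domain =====

-- B replaces A's depth-first ternary recursion by an iterative DFS over an explicit
-- stack of frames (same traversal order, concat conversions kept pending so they
-- happen exactly where A performs them) — a different decomposition, same cost.


-- ===== PORT A =====
-- int(f"{v}{n}") — shared subexpression of both Pythons (f-string of two ints, then int())
def pcConcat (v n : Int) : Option Int := PySem.Int.ofStr? (PySem.Int.toStr v ++ PySem.Int.toStr n)

-- literal transliteration of A's recursion; 'none' arms are where the Python raises
-- (IndexError on nums[index], ValueError in int()), both excluded by Pre_ below
def possible_calibration (target : Int) (nums : List Int) (index : Int) (current_value : Int) (can_concatenate : Bool) : Bool :=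
  if index = (nums.length : Int) then decide (current_value = target)
  else
    match h : PySem.List.pyGet? nums index with
    | none => false
    | some n =>
      possible_calibration target nums (index + 1) (current_value + n) can_concatenate ||
      (possible_calibration target nums (index + 1) (current_value * n) can_concatenate ||
       (can_concatenate &&
        (match pcConcat current_value n with
         | some c => possible_calibration target nums (index + 1) c can_concatenate
         | none => false)))
termination_by ((nums.length : Int) - index).toNat
decreasing_by
  all_goals
    have hr : PySem.Raise.InRange nums.length index := by
      by_contra hc
      rw [← PySem.List.pyGet?_eq_none_iff nums index] at hc
      simp [hc] at h
    obtain ⟨h1, h2⟩ := hr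
    omega

-- ===== PORT B =====
-- a stack frame of Source B: (i, v, none) is a ready pair (i, v); (i, v, some n) is a
-- pending concat frame, turned into (i, int(f"{v}{n}")) when popped, as in Source B
def pcWeight (len : Nat) : Int × Int × Option Int → Nat
  | (i, _, o) => 5 ^ ((len : Int) - i).toNat + (if o.isSome then 1 else 0)

-- the while-loop of Source B over the explicit stack (head = top of stack);
-- the 'none =>' arms are where Source B raises (outside Pre_): the frame is dropped
def pcLoop (target : Int) (nums : List Int) (cc : Bool) : List (Int × Int × Option Int) → Bool
  | [] => false
  | (i, v, some n) :: rest =>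
    match pcConcat v n with
    | none => pcLoop target nums cc rest
    | some c => pcLoop target nums cc ((i, c, none) :: rest)
  | (i, v, none) :: rest =>
    if i = (nums.length : Int) then
      if v = target then true else pcLoop target nums cc rest
    else
      match h : PySem.List.pyGet? nums i with
      | none => pcLoop target nums cc rest
      | some n =>
        pcLoop target nums cc
          ((i + 1, v + n, none) :: (i + 1, v * n, none) ::
            ((if cc then [(i + 1, v, some n)] else []) ++ rest))
termination_by st => (st.map (pcWeight nums.length)).sum
decreasing_by
  all_goals
    first
    | (simp [pcWeight]; done)
    | (have hr : PySem.Raise.InRange nums.length i := by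
         by_contra hc
         rw [← PySem.List.pyGet?_eq_none_iff nums i] at hc
         simp [hc] at h
       obtain ⟨h1, h2⟩ := hr
       have hk : ((nums.length : Int) - i).toNat = ((nums.length : Int) - (i + 1)).toNat + 1 := by
         omega
       have hb : 1 ≤ 5 ^ ((nums.length : Int) - (i + 1)).toNat := Nat.one_le_pow _ _ (by norm_num)
       rcases cc with _ | _ <;> simp [pcWeight, hk, pow_succ] <;> omega)

def possible_calibration_alt (target : Int) (nums : List Int) (index : Int) (current_value : Int) (can_concatenate : Bool) : Bool :=
  pcLoop target nums can_concatenate [(index, current_value, none)]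

-- ===== PRECONDITION & SPEC =====
-- Pre_ excludes exactly the inputs on which the Python A raises — index outside
-- [-len(nums), len(nums)] (IndexError) and, when can_concatenate, a negative number
-- among the elements the search reads, on which int(f"{v}{n}") raises ValueError when
-- reached; on some of those A returns True before reaching the bad concat (B returns
-- True identically there) — they are excluded only because reachability of the raise
-- is not a closed-form condition on the input.
def Pre_possible_calibration (target : Int) (nums : List Int) (index : Int) (current_value : Int) (can_concatenate : Bool) : Prop :=
  -(nums.length : Int) ≤ index ∧ index ≤ (nums.length : Int) ∧
  (can_concatenate = true →
    ∀ n ∈ (if 0 ≤ index then nums.drop index.toNat else nums), (0 : Int) ≤ n)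
instance (target : Int) (nums : List Int) (index : Int) (current_value : Int) (can_concatenate : Bool) : Decidable (Pre_possible_calibration target nums index current_value can_concatenate) := by unfold Pre_possible_calibration; infer_instance

def pvWitness_possible_calibration : Int × List Int × Int × Int × Bool := (190, [10, 19], 1, 10, true)

def Spec_possible_calibration (target : Int) (nums : List Int) (index : Int) (current_value : Int) (can_concatenate : Bool) (out : Bool) : Prop := out = possible_calibration_alt target nums index current_value can_concatenate
instance (target : Int) (nums : List Int) (index : Int) (current_value : Int) (can_concatenate : Bool) (out : Bool) : Decidable (Spec_possible_calibration target nums index current_value can_concatenate out) := by unfold Spec_possible_calibration; infer_instance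

-- ===== CLAIM =====
def Claim_equal_possible_calibration : Prop := ∀ (target : Int) (nums : List Int) (index : Int) (current_value : Int) (can_concatenate : Bool), Dom_possible_calibration target nums index current_value can_concatenate → Pre_possible_calibration target nums index current_value can_concatenate → Spec_possible_calibration target nums index current_value can_concatenate (possible_calibration target nums index current_value can_concatenate)

-- ===== LEMMAS AND PROOFS =====

-- unfolding equations for the two programs, stated per branch

theorem pcA_leaf (target : Int) (nums : List Int) (v : Int) (cc : Bool) (i : Int)
    (hi : i = (nums.length : Int)) :
    possible_calibration target nums i v cc = decide (v = target) := by
  rw [possible_calibration]; simp [hi]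

theorem pcA_step (target : Int) (nums : List Int) (v : Int) (cc : Bool) (i n : Int)
    (hi : i ≠ (nums.length : Int)) (hg : PySem.List.pyGet? nums i = some n) :
    possible_calibration target nums i v cc =
      (possible_calibration target nums (i + 1) (v + n) cc ||
       (possible_calibration target nums (i + 1) (v * n) cc ||
        (cc && (match pcConcat v n with
                | some c => possible_calibration target nums (i + 1) c cc
                | none => false)))) := by
  rw [possible_calibration]
  simp only [hi, if_false]
  split
  · next h' => rw [hg] at h'; cases h'
  · next n' h' => rw [hg] at h'; injection h' with h'; subst h'; rfl

theorem pcA_dead (target : Int) (nums : List Int) (v : Int) (cc : Bool) (i : Int)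
    (hi : i ≠ (nums.length : Int)) (hg : PySem.List.pyGet? nums i = none) :
    possible_calibration target nums i v cc = false := by
  rw [possible_calibration]
  simp only [hi, if_false]
  split
  · rfl
  · next n' h' => rw [hg] at h'; cases h'

theorem pcLoop_leaf (target : Int) (nums : List Int) (cc : Bool) (i v : Int)
    (S : List (Int × Int × Option Int)) (hi : i = (nums.length : Int)) :
    pcLoop target nums cc ((i, v, none) :: S) =
      (if v = target then true else pcLoop target nums cc S) := by
  rw [pcLoop]; simp [hi]

theorem pcLoop_step (target : Int) (nums : List Int) (cc : Bool) (i v n : Int)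
    (S : List (Int × Int × Option Int))
    (hi : i ≠ (nums.length : Int)) (hg : PySem.List.pyGet? nums i = some n) :
    pcLoop target nums cc ((i, v, none) :: S) =
      pcLoop target nums cc
        ((i + 1, v + n, none) :: (i + 1, v * n, none) ::
          ((if cc then [(i + 1, v, some n)] else []) ++ S)) := by
  rw [pcLoop]
  simp only [hi, if_false]
  split
  · next h' => rw [hg] at h'; cases h'
  · next n' h' => rw [hg] at h'; injection h' with h'; subst h'; rfl

theorem pcLoop_dead (target : Int) (nums : List Int) (cc : Bool) (i v : Int)
    (S : List (Int × Int × Option Int))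
    (hi : i ≠ (nums.length : Int)) (hg : PySem.List.pyGet? nums i = none) :
    pcLoop target nums cc ((i, v, none) :: S) = pcLoop target nums cc S := by
  rw [pcLoop]
  simp only [hi, if_false]
  split
  · rfl
  · next n' h' => rw [hg] at h'; cases h'

-- the loop evaluates the top frame as A would, then continues with the rest of the stack
theorem pcLoop_cons (target : Int) (nums : List Int) (cc : Bool) :
    ∀ (k : Nat) (i : Int), (((nums.length : Int) - i).toNat ≤ k) →
      ∀ (v : Int) (S : List (Int × Int × Option Int)),
      pcLoop target nums cc ((i, v, none) :: S) =
        (possible_calibration target nums i v cc || pcLoop target nums cc S) := by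
  intro k
  induction k with
  | zero =>
    intro i hk v S
    by_cases hi : i = (nums.length : Int)
    · rw [pcLoop_leaf target nums cc i v S hi, pcA_leaf target nums v cc i hi]
      by_cases hv : v = target <;> simp [hv]
    · have hout : PySem.List.pyGet? nums i = none := by
        rw [PySem.List.pyGet?_eq_none_iff]
        rintro ⟨h1, h2⟩; omega
      rw [pcLoop_dead target nums cc i v S hi hout, pcA_dead target nums v cc i hi hout]
      simp
  | succ k ih =>
    intro i hk v S
    by_cases hi : i = (nums.length : Int)
    · rw [pcLoop_leaf target nums cc i v S hi, pcA_leaf target nums v cc i hi]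
      by_cases hv : v = target <;> simp [hv]
    · cases hg : PySem.List.pyGet? nums i with
      | none =>
        rw [pcLoop_dead target nums cc i v S hi hg, pcA_dead target nums v cc i hi hg]
        simp
      | some n =>
        have hr : PySem.Raise.InRange nums.length i := by
          by_contra hc
          rw [← PySem.List.pyGet?_eq_none_iff nums i] at hc
          simp [hc] at hg
        obtain ⟨h1, h2⟩ := hr
        have hk' : ((nums.length : Int) - (i + 1)).toNat ≤ k := by omega
        rw [pcLoop_step target nums cc i v n S hi hg,
            pcA_step target nums v cc i n hi hg,
            ih (i + 1) hk' (v + n), ih (i + 1) hk' (v * n)]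
        cases cc with
        | false => simp [Bool.or_assoc]
        | true =>
          simp only [List.singleton_append, if_true]
          rw [pcLoop]
          cases hc : pcConcat v n with
          | none => simp [Bool.or_assoc]
          | some c =>
            simp [ih (i + 1) hk' c, Bool.or_assoc]

-- ===== VERDICT =====
theorem possible_calibration_spec : Claim_equal_possible_calibration := by
  intro target nums index cv cc _ _
  unfold Spec_possible_calibration possible_calibration_alt
  rw [pcLoop_cons target nums cc ((nums.length : Int) - index).toNat index le_rfl cv]
  rw [pcLoop]
  simp
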